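-- pv_equiv track=rewrite | github.com/codingbabyguy/Dual-exumi | visualize_aligned_poses_cli.py | _parse_episode_selector
-- ===== SOURCE A (Python) =====
-- def _parse_episode_selector(selector: str, available: list[int]) -> list[int]:
--     if not selector.strip():
--         return sorted(available)
--
--     selected: set[int] = set()
--     for token in selector.split(","):
--         part = token.strip()
--         if not part:
--             continue
--         if "-" in part:
--             pieces = part.split("-", maxsplit=1)
--             if len(pieces) != 2:
--                 continue
--             start = int(pieces[0].strip())
--             end = int(pieces[1].strip())
--             if end < start:
--                 start, end = end, start
--             for ep in range(start, end + 1):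
--                 selected.add(ep)
--         else:
--             selected.add(int(part))
--     available_set = set(available)
--     return sorted([ep for ep in selected if ep in available_set])
-- ===== SOURCE B (Python) =====
-- def _interval(part):
--     # part is a stripped, non-empty token; raises ValueError exactly where A's int() calls do
--     if "-" in part:
--         a_s, b_s = part.split("-", maxsplit=1)
--         a = int(a_s.strip())
--         b = int(b_s.strip())
--         return (a, b) if a <= b else (b, a)
--     n = int(part)
--     return (n, n)
--
--
-- def _collect(tokens):
--     if not tokens:
--         return []
--     part = tokens[0].strip()
--     if not part:
--         return _collect(tokens[1:])
--     return [_interval(part)] + _collect(tokens[1:])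
--
--
-- def _covered(intervals, ep):
--     for lo, hi in intervals:
--         if lo <= ep <= hi:
--             return True
--     return False
--
--
-- def _parse_episode_selector(selector: str, available: list[int]) -> list[int]:
--     if not selector.strip():
--         return sorted(available)
--     intervals = _collect(selector.split(","))
--     return [ep for ep in sorted(set(available)) if _covered(intervals, ep)]
-- ===== Notes on version B (the rewrite author's own statement) =====
-- stated objective: faster
-- what changed: B never expands a range token into its concrete integers: it recursively collects normalized (lo,hi) interval pairs and then filters the sorted deduplicated available list by interval membership, instead of A's element-by-element set expansion followed by a final sort.
import Mathlib
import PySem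

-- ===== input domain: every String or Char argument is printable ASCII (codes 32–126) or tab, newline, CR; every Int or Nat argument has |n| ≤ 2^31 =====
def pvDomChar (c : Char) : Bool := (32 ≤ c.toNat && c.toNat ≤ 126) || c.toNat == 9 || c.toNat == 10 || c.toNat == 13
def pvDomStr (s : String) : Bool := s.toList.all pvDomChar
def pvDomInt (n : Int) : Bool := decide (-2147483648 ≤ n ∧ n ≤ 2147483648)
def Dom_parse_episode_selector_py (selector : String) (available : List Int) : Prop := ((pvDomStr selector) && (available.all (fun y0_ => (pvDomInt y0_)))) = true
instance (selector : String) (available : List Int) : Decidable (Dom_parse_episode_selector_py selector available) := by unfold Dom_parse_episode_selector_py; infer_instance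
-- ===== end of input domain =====

-- B never expands a range into its concrete integers: it recursively collects normalized
-- (lo, hi) interval pairs and filters the sorted deduplicated available list by interval
-- membership (objective: faster on wide ranges; the RETURN value is what is proved equal).

-- ===== PORT A =====
-- helper: A's swap 'start, end = end, start' followed by 'for ep in range(start, end+1): selected.add(ep)'
def pvAddRange (s : PySem.Set Int) (start endv : Int) : PySem.Set Int :=
  if endv < start then PySem.Set.update s (PySem.List.pyRange endv (start + 1) 1)
  else PySem.Set.update s (PySem.List.pyRange start (endv + 1) 1)

-- loop body of A's 'for token in selector.split(",")' (int() failures are outside Pre_; the port defaults them to 0 there)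
def pvStepA (s : PySem.Set Int) (token : String) : PySem.Set Int :=
  if PySem.Str.strip token = "" then s
  else if PySem.Str.isIn "-" (PySem.Str.strip token) then
    -- part.split("-", maxsplit=1) is always some (sep ≠ ""); the wildcard arm is Python's 'len(pieces) != 2: continue'
    match (PySem.Str.splitMax? (PySem.Str.strip token) "-" 1).getD [] with
    | [p0, p1] =>
      pvAddRange s ((PySem.Int.ofStr? (PySem.Str.strip p0)).getD 0)
        ((PySem.Int.ofStr? (PySem.Str.strip p1)).getD 0)
    | _ => s
  else PySem.Set.add s ((PySem.Int.ofStr? (PySem.Str.strip token)).getD 0)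

def parse_episode_selector_py (selector : String) (available : List Int) : List Int :=
  if PySem.Str.strip selector = "" then PySem.List.sorted available (fun x => x) false
  else
    -- selector.split(",") is always some (sep ≠ "")
    let selected : PySem.Set Int := ((PySem.Str.split? selector ",").getD []).foldl pvStepA PySem.Set.empty
    let available_set : PySem.Set Int := PySem.Set.ofList available
    PySem.List.sorted (selected.filter (fun ep => PySem.Set.contains available_set ep)) (fun x => x) false

-- ===== PORT B =====
-- B's _interval on an already-stripped non-empty token; 'none' only in the unreachable arm where
-- split("-", 1) of a string containing "-" would not give two pieces (Python B's unpacking would raise there)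
def pvInterval (part : String) : Option (Int × Int) :=
  if PySem.Str.isIn "-" part then
    match (PySem.Str.splitMax? part "-" 1).getD [] with
    | [a_s, b_s] =>
      let a := (PySem.Int.ofStr? (PySem.Str.strip a_s)).getD 0
      let b := (PySem.Int.ofStr? (PySem.Str.strip b_s)).getD 0
      some (if a ≤ b then (a, b) else (b, a))
    | _ => none
  else
    let n := (PySem.Int.ofStr? part).getD 0
    some (n, n)

-- B's _collect: structural recursion over the token list
def pvCollect : List String → List (Int × Int)
  | [] => []
  | t :: ts =>
    if PySem.Str.strip t = "" then pvCollect ts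
    else
      match pvInterval (PySem.Str.strip t) with
      | some iv => iv :: pvCollect ts
      | none => pvCollect ts

-- B's _covered: scan the intervals until one contains ep
def pvCovered : List (Int × Int) → Int → Bool
  | [], _ => false
  | iv :: rest, ep => if iv.1 ≤ ep ∧ ep ≤ iv.2 then true else pvCovered rest ep

def parse_episode_selector_py_alt (selector : String) (available : List Int) : List Int :=
  if PySem.Str.strip selector = "" then PySem.List.sorted available (fun x => x) false
  else
    let intervals := pvCollect ((PySem.Str.split? selector ",").getD [])
    (PySem.List.sorted (PySem.Set.ofList available) (fun x => x) false).filter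
      (fun ep => pvCovered intervals ep)

-- ===== PRECONDITION & SPEC =====
-- a token is accepted iff every int() call Python makes on it succeeds
def pvTokenOK (token : String) : Bool :=
  if PySem.Str.strip token = "" then true
  else if PySem.Str.isIn "-" (PySem.Str.strip token) then
    match (PySem.Str.splitMax? (PySem.Str.strip token) "-" 1).getD [] with
    | [p0, p1] => (PySem.Int.ofStr? (PySem.Str.strip p0)).isSome && (PySem.Int.ofStr? (PySem.Str.strip p1)).isSome
    | _ => true
  else (PySem.Int.ofStr? (PySem.Str.strip token)).isSome

-- exactly the inputs on which Python A returns: every comma token must parse as an int or an int range (else int() raises ValueError)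
def Pre_parse_episode_selector_py (selector : String) (available : List Int) : Prop :=
  PySem.Str.strip selector = "" ∨ ∀ token ∈ (PySem.Str.split? selector ",").getD [], pvTokenOK token = true
instance (selector : String) (available : List Int) : Decidable (Pre_parse_episode_selector_py selector available) := by unfold Pre_parse_episode_selector_py; infer_instance

def pvWitness_parse_episode_selector_py : String × List Int := ("1-3, 7,9-5", [7, 2, 2, 9, 11])

def Spec_parse_episode_selector_py (selector : String) (available : List Int) (out : List Int) : Prop := out = parse_episode_selector_py_alt selector available
instance (selector : String) (available : List Int) (out : List Int) : Decidable (Spec_parse_episode_selector_py selector available out) := by unfold Spec_parse_episode_selector_py; infer_instance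

-- ===== CLAIM (what is proved, stated in full; the proofs are below) =====
def Claim_equal_parse_episode_selector_py : Prop := ∀ (selector : String) (available : List Int), Dom_parse_episode_selector_py selector available → Pre_parse_episode_selector_py selector available → Spec_parse_episode_selector_py selector available (parse_episode_selector_py selector available)

-- ===== LEMMAS AND PROOFS =====

-- B's scan of the intervals decides exactly "some interval contains x"
lemma pvCovered_iff (ivs : List (Int × Int)) (x : Int) :
    pvCovered ivs x = true ↔ ∃ iv ∈ ivs, iv.1 ≤ x ∧ x ≤ iv.2 := by
  induction ivs with
  | nil => simp [pvCovered]
  | cons iv rest ih =>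
    by_cases h : iv.1 ≤ x ∧ x ≤ iv.2
    · simp [pvCovered, h]
    · simp only [pvCovered, if_neg h, ih, List.mem_cons]
      constructor
      · rintro ⟨jv, hjv, h1, h2⟩; exact ⟨jv, Or.inr hjv, h1, h2⟩
      · rintro ⟨jv, rfl | hjv, h1, h2⟩
        · exact absurd ⟨h1, h2⟩ h
        · exact ⟨jv, hjv, h1, h2⟩

-- B's collector distributes over token-list concatenation
lemma pvCollect_append (l1 l2 : List String) :
    pvCollect (l1 ++ l2) = pvCollect l1 ++ pvCollect l2 := by
  induction l1 with
  | nil => simp [pvCollect]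
  | cons t ts ih =>
    simp only [List.cons_append, pvCollect]
    split_ifs with h
    · exact ih
    · cases pvInterval (PySem.Str.strip t) <;> simp [ih]

-- one A-range addition corresponds to one normalized B interval
lemma pvAddRange_mem (s : PySem.Set Int) (a b x : Int) :
    x ∈ pvAddRange s a b ↔ x ∈ s ∨ ((if a ≤ b then ((a, b) : Int × Int) else (b, a)).1 ≤ x ∧ x ≤ (if a ≤ b then ((a, b) : Int × Int) else (b, a)).2) := by
  unfold pvAddRange
  split_ifs with h1 h2 h3 <;>
    simp only [PySem.Set.mem_update, PySem.List.mem_pyRange_one] <;>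
    exact or_congr Iff.rfl (by omega)

-- one token of A's loop adds exactly the points covered by B's interval for that token
lemma pvStep_mem (s : PySem.Set Int) (t : String) (x : Int) :
    x ∈ pvStepA s t ↔ x ∈ s ∨ ∃ iv ∈ pvCollect [t], iv.1 ≤ x ∧ x ≤ iv.2 := by
  by_cases h1 : PySem.Str.strip t = ""
  · simp [pvStepA, pvCollect, h1]
  · by_cases h2 : PySem.Chars.isIn ['-'] (PySem.Chars.strip t.toList) = true
    · cases hp : (PySem.Str.splitMax? (PySem.Str.strip t) "-" 1).getD [] with
      | nil =>
        have e1 : pvStepA s t = s := by simp [pvStepA, h1, h2, hp]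
        have e2 : pvCollect [t] = [] := by simp [pvCollect, pvInterval, h1, h2, hp]
        rw [e1, e2]; simp
      | cons p0 rest =>
        cases rest with
        | nil =>
          have e1 : pvStepA s t = s := by simp [pvStepA, h1, h2, hp]
          have e2 : pvCollect [t] = [] := by simp [pvCollect, pvInterval, h1, h2, hp]
          rw [e1, e2]; simp
        | cons p1 rest2 =>
          cases rest2 with
          | cons _ _ =>
            have e1 : pvStepA s t = s := by simp [pvStepA, h1, h2, hp]
            have e2 : pvCollect [t] = [] := by simp [pvCollect, pvInterval, h1, h2, hp]
            rw [e1, e2]; simp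
          | nil =>
            have e1 : pvStepA s t = pvAddRange s
                ((PySem.Int.ofStr? (PySem.Str.strip p0)).getD 0)
                ((PySem.Int.ofStr? (PySem.Str.strip p1)).getD 0) := by
              simp [pvStepA, h1, h2, hp]
            have e2 : pvCollect [t] =
                [if (PySem.Int.ofStr? (PySem.Str.strip p0)).getD 0 ≤
                    (PySem.Int.ofStr? (PySem.Str.strip p1)).getD 0 then
                  (((PySem.Int.ofStr? (PySem.Str.strip p0)).getD 0 : Int),
                    (PySem.Int.ofStr? (PySem.Str.strip p1)).getD 0)
                else
                  ((PySem.Int.ofStr? (PySem.Str.strip p1)).getD 0,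
                    (PySem.Int.ofStr? (PySem.Str.strip p0)).getD 0)] := by
              simp [pvCollect, pvInterval, h1, h2, hp]
            rw [e1, e2]
            simp only [List.mem_cons, List.not_mem_nil, or_false, exists_eq_left]
            exact pvAddRange_mem s _ _ x
    · have e1 : pvStepA s t = PySem.Set.add s ((PySem.Int.ofStr? (PySem.Str.strip t)).getD 0) := by
        simp [pvStepA, h1, h2]
      have e2 : pvCollect [t] = [(((PySem.Int.ofStr? (PySem.Str.strip t)).getD 0 : Int),
          (PySem.Int.ofStr? (PySem.Str.strip t)).getD 0)] := by
        simp [pvCollect, pvInterval, h1, h2]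
      rw [e1, e2, PySem.Set.mem_add]
      simp only [List.mem_cons, List.not_mem_nil, or_false, exists_eq_left]
      exact or_congr Iff.rfl (by constructor <;> (intro h; omega))

-- the loop invariant: A's accumulated set is exactly "some collected interval contains x"
lemma pvFold_mem (tokens : List String) (s : PySem.Set Int) (x : Int) :
    x ∈ tokens.foldl pvStepA s ↔ x ∈ s ∨ ∃ iv ∈ pvCollect tokens, iv.1 ≤ x ∧ x ≤ iv.2 := by
  induction tokens generalizing s with
  | nil => simp [pvCollect]
  | cons t ts ih =>
    rw [List.foldl_cons, ih, show (t :: ts) = [t] ++ ts from rfl, pvCollect_append,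
      pvStep_mem s t x]
    simp only [List.mem_append]
    constructor
    · rintro ((hx | ⟨iv, hiv, hc⟩) | ⟨iv, hiv, hc⟩)
      · exact Or.inl hx
      · exact Or.inr ⟨iv, Or.inl hiv, hc⟩
      · exact Or.inr ⟨iv, Or.inr hiv, hc⟩
    · rintro (hx | ⟨iv, hiv | hiv, hc⟩)
      · exact Or.inl (Or.inl hx)
      · exact Or.inl (Or.inr ⟨iv, hiv, hc⟩)
      · exact Or.inr ⟨iv, hiv, hc⟩

-- A's accumulator stays duplicate-free
lemma pvAddRange_nodup (s : PySem.Set Int) (a b : Int) (h : s.Nodup) : (pvAddRange s a b).Nodup := by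
  unfold pvAddRange
  split_ifs
  · exact PySem.Set.nodup_update _ _ h
  · exact PySem.Set.nodup_update _ _ h

lemma pvStepA_nodup (s : PySem.Set Int) (token : String) (h : s.Nodup) : (pvStepA s token).Nodup := by
  unfold pvStepA
  split_ifs with h1 h2
  · exact h
  · cases (PySem.Str.splitMax? (PySem.Str.strip token) "-" 1).getD [] with
    | nil => exact h
    | cons p0 rest =>
      cases rest with
      | nil => exact h
      | cons p1 rest2 =>
        cases rest2 with
        | cons _ _ => exact h
        | nil => exact pvAddRange_nodup s _ _ h
  · exact PySem.Set.nodup_add _ _ h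

lemma pvFoldA_nodup (tokens : List String) (s : PySem.Set Int) (h : s.Nodup) :
    (tokens.foldl pvStepA s).Nodup := by
  induction tokens generalizing s with
  | nil => exact h
  | cons t ts ih => exact ih _ (pvStepA_nodup s t h)

-- ===== VERDICT (by name: the statement is the Claim_ definition above) =====
theorem parse_episode_selector_py_spec : Claim_equal_parse_episode_selector_py := by
  intro selector available _ _
  unfold Spec_parse_episode_selector_py parse_episode_selector_py parse_episode_selector_py_alt
  by_cases hs : PySem.Str.strip selector = ""
  · simp [hs]
  · simp only [hs, if_false]
    set tokens := (PySem.Str.split? selector ",").getD [] with htk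
    apply PySem.List.sorted_eq_of_perm_of_pairwise_lt
    · -- B's filtered sorted list is a permutation of A's filtered set
      rw [List.perm_ext_iff_of_nodup
        (List.Nodup.filter _ ((PySem.List.sorted_perm _ _ _).nodup_iff.mpr (PySem.Set.nodup_ofList _)))
        (List.Nodup.filter _ (pvFoldA_nodup tokens PySem.Set.empty (by exact List.nodup_nil)))]
      intro x
      rw [List.mem_filter, List.mem_filter, PySem.List.mem_sorted,
        pvFold_mem tokens PySem.Set.empty x]
      simp only [PySem.Set.contains_iff, PySem.Set.mem_ofList, pvCovered_iff]
      constructor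
      · rintro ⟨hx, hc⟩
        exact ⟨Or.inr hc, hx⟩
      · rintro ⟨hc | hc, hx⟩
        · exact absurd hc (by simp [PySem.Set.empty])
        · exact ⟨hx, hc⟩
    · -- B's result is strictly increasing: filtering preserves it
      exact (PySem.List.sorted_ofList_pairwise_lt available).filter _
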